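-- pv_equiv track=rewrite | github.com/goulu/Goulib | Goulib/math2.py | veccompare
-- ===== SOURCE A (Python) =====
-- def veccompare(a,b):
--     '''compare values in 2 lists. returns triple number of pairs where [a<b, a==b, a>b]'''
--     res=[0,0,0]
--     for ai,bi in zip(a,b):
--         if ai<bi:
--             res[0]+=1
--         elif ai==bi:
--             res[1]+=1
--         else:
--             res[2]+=1
--     return res
-- ===== SOURCE B (Python) =====
-- def veccompare(a, b):
--     pairs = list(zip(a, b))
--     less = sum(1 for ai, bi in pairs if ai < bi)
--     equal = sum(1 for ai, bi in pairs if ai == bi)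
--     return [less, equal, len(pairs) - less - equal]
-- ===== Notes on version B (the rewrite author's own statement) =====
-- stated objective: alternative
-- what changed: Replaced the single stateful loop updating a 3-slot mutable list with two independent counting passes over zip(a,b) (less and equal), deriving the greater count by subtraction from the pair count.
import Mathlib
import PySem

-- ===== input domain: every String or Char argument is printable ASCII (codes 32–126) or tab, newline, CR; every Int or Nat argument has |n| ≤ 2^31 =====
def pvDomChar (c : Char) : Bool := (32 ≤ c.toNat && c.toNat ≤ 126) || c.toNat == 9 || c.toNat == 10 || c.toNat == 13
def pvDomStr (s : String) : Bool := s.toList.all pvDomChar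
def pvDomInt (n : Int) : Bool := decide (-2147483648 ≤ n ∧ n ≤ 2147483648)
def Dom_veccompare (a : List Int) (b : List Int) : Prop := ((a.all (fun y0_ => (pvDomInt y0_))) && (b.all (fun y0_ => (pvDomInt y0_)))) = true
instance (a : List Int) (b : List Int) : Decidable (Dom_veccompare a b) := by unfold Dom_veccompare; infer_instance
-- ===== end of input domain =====

-- B replaces A's single stateful loop over a mutable 3-slot list with two independent
-- counting passes (less, equal) over the zipped pairs, deriving 'greater' by subtraction
-- (objective: alternative decomposition, same cost).

-- ===== PORT A =====
-- A's loop over zip(a,b) updating res=[l,e,g] in place, ported as a foldl over the same triple.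
def veccompare (a : List Int) (b : List Int) : List Int :=
  let r := (a.zip b).foldl
    (fun (r : Int × Int × Int) p =>
      if p.1 < p.2 then (r.1 + 1, r.2.1, r.2.2)
      else if p.1 = p.2 then (r.1, r.2.1 + 1, r.2.2)
      else (r.1, r.2.1, r.2.2 + 1))
    (0, 0, 0)
  [r.1, r.2.1, r.2.2]

-- ===== PORT B =====
-- B: pairs = zip(a,b); two independent counting passes; third count by subtraction.
def veccompare_alt (a : List Int) (b : List Int) : List Int :=
  let pairs := a.zip b
  let less : Int := pairs.countP (fun p => decide (p.1 < p.2))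
  let equal : Int := pairs.countP (fun p => decide (p.1 = p.2))
  [less, equal, (pairs.length : Int) - less - equal]

-- ===== PRECONDITION & SPEC =====
def Spec_veccompare (a : List Int) (b : List Int) (out : List Int) : Prop := out = veccompare_alt a b
instance (a : List Int) (b : List Int) (out : List Int) : Decidable (Spec_veccompare a b out) := by unfold Spec_veccompare; infer_instance

-- ===== CLAIM (what is proved, stated in full; the proofs are below) =====
def Claim_equal_veccompare : Prop := ∀ (a : List Int) (b : List Int), Dom_veccompare a b → Spec_veccompare a b (veccompare a b)

-- ===== LEMMAS AND PROOFS =====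

theorem veccompare_fold_eq (l : List (Int × Int)) (l0 e0 g0 : Int) :
    l.foldl
      (fun (r : Int × Int × Int) p =>
        if p.1 < p.2 then (r.1 + 1, r.2.1, r.2.2)
        else if p.1 = p.2 then (r.1, r.2.1 + 1, r.2.2)
        else (r.1, r.2.1, r.2.2 + 1))
      (l0, e0, g0)
    = (l0 + l.countP (fun p => decide (p.1 < p.2)),
       e0 + l.countP (fun p => decide (p.1 = p.2)),
       g0 + l.countP (fun p => decide (p.2 < p.1))) := by
  induction l generalizing l0 e0 g0 with
  | nil => simp
  | cons h t ih =>
    by_cases h1 : h.1 < h.2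
    · have h2 : ¬ (h.1 = h.2) := by omega
      have h3 : ¬ (h.2 < h.1) := by omega
      simp [List.foldl_cons, h1, h2, h3, ih]; ring
    · by_cases h2 : h.1 = h.2
      · have h3 : ¬ (h.2 < h.1) := by omega
        simp [List.foldl_cons, h1, h2, ih]; ring
      · have h3 : h.2 < h.1 := by omega
        simp [List.foldl_cons, h1, h2, h3, ih]; ring

theorem countP_three (l : List (Int × Int)) :
    (l.length : Int)
    = l.countP (fun p => decide (p.1 < p.2))
      + l.countP (fun p => decide (p.1 = p.2))
      + l.countP (fun p => decide (p.2 < p.1)) := by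
  induction l with
  | nil => simp
  | cons h t ih =>
    simp only [List.length_cons, List.countP_cons]
    rcases lt_trichotomy h.1 h.2 with h1 | h1 | h1
    · have h2 : ¬ (h.1 = h.2) := by omega
      have h3 : ¬ (h.2 < h.1) := by omega
      simp [h1, h2, h3]; omega
    · have h2 : ¬ (h.1 < h.2) := by omega
      have h3 : ¬ (h.2 < h.1) := by omega
      simp [h1]; omega
    · have h2 : ¬ (h.1 < h.2) := by omega
      have h3 : ¬ (h.1 = h.2) := by omega
      simp [h1, h2, h3]; omega

-- ===== VERDICT (by name: the statement is the Claim_ definition above) =====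
theorem veccompare_spec : Claim_equal_veccompare := by
  intro a b _
  unfold Spec_veccompare veccompare veccompare_alt
  simp only [veccompare_fold_eq, zero_add]
  have := countP_three (a.zip b)
  simp only [List.cons.injEq, and_true]
  refine ⟨trivial, trivial, by omega⟩
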